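-- pv_equiv track=rewrite | github.com/Ryan-the-hito/Tomato | Tomato/Tomato.py | _parse_collection_markdown
-- ===== SOURCE A (Python) =====
-- def _parse_collection_markdown(text):
-- 	sections = []
-- 	current_header = None
-- 	buffer = []
-- 	for line in text.splitlines():
-- 		if line.startswith('# '):
-- 			if current_header is not None:
-- 				sections.append((current_header, '\n'.join(buffer).strip()))
-- 			current_header = line[2:].strip()
-- 			buffer = []
-- 		else:
-- 			buffer.append(line)
-- 	if current_header is not None:
-- 		sections.append((current_header, '\n'.join(buffer).strip()))
-- 	return sections
-- ===== SOURCE B (Python) =====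
-- def _parse_collection_markdown(text):
-- 	sections = []
-- 	body = []
-- 	for line in reversed(text.splitlines()):
-- 		if line.startswith('# '):
-- 			body.reverse()
-- 			sections.append((line[2:].strip(), '\n'.join(body).strip()))
-- 			body = []
-- 		else:
-- 			body.append(line)
-- 	sections.reverse()
-- 	return sections
-- ===== Notes on version B (the rewrite author's own statement) =====
-- stated objective: alternative
-- what changed: B traverses the lines in reverse and builds the output back-to-front, collecting each body until its header is reached; this removes A's Optional current_header state and the final flush step (pre-header lines simply fall off in the discarded last buffer).
import Mathlib
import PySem

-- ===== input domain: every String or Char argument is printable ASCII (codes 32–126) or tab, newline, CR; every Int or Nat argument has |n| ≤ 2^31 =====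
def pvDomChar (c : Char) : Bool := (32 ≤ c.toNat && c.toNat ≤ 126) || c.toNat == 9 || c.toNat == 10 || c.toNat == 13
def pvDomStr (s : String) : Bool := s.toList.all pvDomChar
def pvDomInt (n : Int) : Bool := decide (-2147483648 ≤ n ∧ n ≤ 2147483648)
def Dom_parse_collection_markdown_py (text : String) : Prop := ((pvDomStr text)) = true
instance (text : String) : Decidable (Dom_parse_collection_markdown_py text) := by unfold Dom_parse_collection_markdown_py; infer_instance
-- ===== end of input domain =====

-- B iterates the lines in reverse and builds the sections back-to-front, dropping A's
-- Optional current_header state and the final flush (objective: alternative decomposition).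

-- ===== PORT A =====
-- loop body of A: state = (sections, current_header, buffer)
def pvAStep (st : List (String × String) × Option String × List String) (line : String) :
    List (String × String) × Option String × List String :=
  if PySem.Str.startswith line "# " then
    let secs := match st.2.1 with
      | some h => st.1 ++ [(h, PySem.Str.strip (PySem.Str.join "\n" st.2.2))]
      | none => st.1
    (secs, some (PySem.Str.strip (PySem.Str.slice line (some 2) none)), [])
  else
    (st.1, st.2.1, st.2.2 ++ [line])

def parse_collection_markdown_py (text : String) : List (String × String) :=
  let st := (PySem.Str.splitlines text).foldl pvAStep ([], none, [])
  match st.2.1 with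
  | some h => st.1 ++ [(h, PySem.Str.strip (PySem.Str.join "\n" st.2.2))]
  | none => st.1

-- ===== PORT B =====
-- loop body of B: state = (sections, body), lines fed in reverse order
def pvBStep (st : List (String × String) × List String) (line : String) :
    List (String × String) × List String :=
  if PySem.Str.startswith line "# " then
    (st.1 ++ [(PySem.Str.strip (PySem.Str.slice line (some 2) none),
               PySem.Str.strip (PySem.Str.join "\n" st.2.reverse))], [])
  else
    (st.1, st.2 ++ [line])

def parse_collection_markdown_py_alt (text : String) : List (String × String) :=
  let st := (PySem.Str.splitlines text).reverse.foldl pvBStep ([], [])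
  st.1.reverse

-- ===== PRECONDITION & SPEC =====
def Spec_parse_collection_markdown_py (text : String) (out : List (String × String)) : Prop := out = parse_collection_markdown_py_alt text
instance (text : String) (out : List (String × String)) : Decidable (Spec_parse_collection_markdown_py text out) := by unfold Spec_parse_collection_markdown_py; infer_instance

-- ===== CLAIM (what is proved, stated in full; the proofs are below) =====
def Claim_equal_parse_collection_markdown_py : Prop := ∀ (text : String), Dom_parse_collection_markdown_py text → Spec_parse_collection_markdown_py text (parse_collection_markdown_py text)

-- ===== LEMMAS AND PROOFS =====

-- proof helpers: both ports are shown equal to the structural recursion pvParse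
def pvIsHdr (l : String) : Bool := PySem.Str.startswith l "# "

def pvHd (l : String) : String := PySem.Str.strip (PySem.Str.slice l (some 2) none)

def pvBody (buf : List String) : String := PySem.Str.strip (PySem.Str.join "\n" buf)

def pvParse : List String → List (String × String)
  | [] => []
  | l :: ls =>
    if pvIsHdr l then
      (pvHd l, pvBody (ls.takeWhile (fun x => !pvIsHdr x))) ::
        pvParse (ls.dropWhile (fun x => !pvIsHdr x))
    else
      pvParse ls
termination_by ls => ls.length
decreasing_by
  · exact Nat.lt_succ_of_le (List.length_dropWhile_le _ _)
  · exact Nat.lt_succ_iff.mpr le_rfl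

def pvFlush (st : List (String × String) × Option String × List String) : List (String × String) :=
  match st.2.1 with
  | some h => st.1 ++ [(h, pvBody st.2.2)]
  | none => st.1

-- the step functions of the two ports, re-expressed through the opaque helpers (definitional)
theorem pvAStep_eq (st : List (String × String) × Option String × List String) (l : String) :
    pvAStep st l =
      if pvIsHdr l then
        ((match st.2.1 with
          | some h => st.1 ++ [(h, pvBody st.2.2)]
          | none => st.1), some (pvHd l), [])
      else (st.1, st.2.1, st.2.2 ++ [l]) := rfl

theorem pvBStep_eq (st : List (String × String) × List String) (l : String) :
    pvBStep st l =
      if pvIsHdr l then (st.1 ++ [(pvHd l, pvBody st.2.reverse)], [])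
      else (st.1, st.2 ++ [l]) := rfl

theorem pvParse_dropWhile (ls : List String) :
    pvParse (ls.dropWhile (fun x => !pvIsHdr x)) = pvParse ls := by
  induction ls with
  | nil => rfl
  | cons l ls ih =>
    by_cases h : pvIsHdr l = true
    · simp [h]
    · simp [h, ih, pvParse]

theorem pvAStep_inv (ls : List String) :
    (∀ (secs : List (String × String)) (h : String) (buf : List String),
      pvFlush (ls.foldl pvAStep (secs, some h, buf)) =
        secs ++ (h, pvBody (buf ++ ls.takeWhile (fun x => !pvIsHdr x))) ::
          pvParse (ls.dropWhile (fun x => !pvIsHdr x))) ∧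
    (∀ (secs : List (String × String)) (buf : List String),
      pvFlush (ls.foldl pvAStep (secs, none, buf)) = secs ++ pvParse ls) := by
  induction ls with
  | nil =>
    refine ⟨fun secs h buf => ?_, fun secs buf => ?_⟩
    · simp [pvFlush, pvParse]
    · simp [pvFlush, pvParse]
  | cons l ls ih =>
    refine ⟨fun secs h buf => ?_, fun secs buf => ?_⟩
    · by_cases hl : pvIsHdr l = true
      · simp only [List.foldl_cons, pvAStep_eq]
        rw [if_pos hl]
        rw [ih.1]
        simp [hl, pvParse]
      · simp only [Bool.not_eq_true] at hl
        simp only [List.foldl_cons, pvAStep_eq]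
        rw [if_neg (by simp [hl])]
        rw [ih.1]
        simp [hl]
    · by_cases hl : pvIsHdr l = true
      · simp only [List.foldl_cons, pvAStep_eq]
        rw [if_pos hl]
        rw [ih.1]
        simp [hl, pvParse]
      · simp only [Bool.not_eq_true] at hl
        simp only [List.foldl_cons, pvAStep_eq]
        rw [if_neg (by simp [hl])]
        rw [ih.2]
        simp [hl, pvParse]

theorem pvBStep_inv (ls : List String) :
    ls.reverse.foldl pvBStep ([], []) =
      ((pvParse ls).reverse, (ls.takeWhile (fun x => !pvIsHdr x)).reverse) := by
  rw [List.foldl_reverse]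
  induction ls with
  | nil => simp [pvParse]
  | cons l ls ih =>
    simp only [List.foldr_cons]
    rw [ih, pvBStep_eq]
    by_cases hl : pvIsHdr l = true
    · rw [if_pos hl]
      rw [← pvParse_dropWhile ls]
      simp [hl, pvParse, pvParse_dropWhile]
    · simp only [Bool.not_eq_true] at hl
      rw [if_neg (by simp [hl])]
      simp [hl, pvParse]

-- ===== VERDICT (by name: the statement is the Claim_ definition above) =====
theorem parse_collection_markdown_py_spec : Claim_equal_parse_collection_markdown_py := by
  intro text _
  have hA : parse_collection_markdown_py text =
      pvFlush ((PySem.Str.splitlines text).foldl pvAStep ([], none, [])) := rfl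
  have hB : parse_collection_markdown_py_alt text =
      ((PySem.Str.splitlines text).reverse.foldl pvBStep ([], [])).1.reverse := rfl
  unfold Spec_parse_collection_markdown_py
  rw [hA, hB, pvBStep_inv, (pvAStep_inv _).2 [] []]
  simp
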